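-- pv_equiv track=rewrite | github.com/thomas783/coding_test | baekjoon/bfs/13460.py | tilt_right
-- ===== SOURCE A (Python) =====
-- import copy
--
-- def tilt_right(temp_map) : # 오른쪽으로 기울이는 함수
--     maps = copy.deepcopy(temp_map)
--     out = []
--     for m in range(len(maps)) :
--         for n in range(len(maps[m])-1,-1,-1) : # 오른쪽으로 미뤄질 수 있게 탐색할 때 오른쪽부터 찾는다.
--             if maps[m][n] == 'B' :
--                 a,b = m,n
--                 while maps[a][b] == 'B' and maps[a][b+1] == '.' :
--                     maps[a][b+1] = 'B'; maps[a][b] = '.'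
--                     b += 1
--                 if maps[a][b+1] == 'O' :
--                     maps[a][b] = '.'
--                     out.append('B')
--             if maps[m][n] == 'R' :
--                 a,b = m,n
--                 while maps[a][b] == 'R' and maps[a][b+1] == '.' :
--                     maps[a][b+1] = 'R'; maps[a][b] = '.'
--                     b += 1
--                 if maps[a][b+1] == 'O' :
--                     maps[a][b] = '.'
--                     out.append('R')
--     return maps,out
-- ===== SOURCE B (Python) =====
-- def tilt_right(temp_map):
--     maps = []
--     out = []
--     for row in temp_map:
--         res = list(row)
--         slot = len(res) - 1   # where the next ball sliding right will land
--         hole = False          # True: the next ball falls into a hole 'O'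
--         for j in range(len(res) - 1, -1, -1):
--             c = res[j]
--             if c == 'B' or c == 'R':
--                 res[j] = '.'
--                 if hole:
--                     out.append(c)
--                 else:
--                     res[slot] = c
--                     slot -= 1
--             elif c == 'O':
--                 hole = True
--             elif c != '.':
--                 slot = j - 1
--                 hole = False
--         maps.append(res)
--     return maps, out
-- ===== Notes on version B (the rewrite author's own statement) =====
-- stated objective: alternative
-- what changed: Instead of re-sliding every ball cell-by-cell with an inner while loop (quadratic per row), B does one right-to-left sweep per row maintaining the next landing slot and a hole flag, touching each cell once.
-- crash fix: A raises IndexError whenever some row contains a ball ('B'/'R') with only '.' cells strictly to its right (the ball slides off the row end); B returns the map with that ball slid to the last column. — e.g. on tilt_right([["B", "."]]): A raises IndexError, B returns ([[".", "B"]], [])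
import Mathlib
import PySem

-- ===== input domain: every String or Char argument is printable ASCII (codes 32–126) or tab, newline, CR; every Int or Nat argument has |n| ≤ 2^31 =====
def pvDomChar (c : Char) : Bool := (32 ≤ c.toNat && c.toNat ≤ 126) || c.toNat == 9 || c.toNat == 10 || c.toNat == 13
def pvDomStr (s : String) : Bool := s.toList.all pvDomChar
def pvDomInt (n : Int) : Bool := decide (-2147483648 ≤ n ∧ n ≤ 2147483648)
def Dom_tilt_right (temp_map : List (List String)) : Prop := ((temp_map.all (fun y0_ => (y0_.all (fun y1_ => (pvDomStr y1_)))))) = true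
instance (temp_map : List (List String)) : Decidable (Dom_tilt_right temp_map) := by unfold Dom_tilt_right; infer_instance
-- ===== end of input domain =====

-- B replaces A's per-ball inner while-slide by one right-to-left sweep per row that tracks
-- the next landing slot and a hole flag, touching each cell once (alternative algorithm).


-- ===== PORT A =====
-- A's inner while loop: slide a ball of colour c right from index b while the next cell is '.'.
-- Python reads maps[a][b+1] and RAISES when b+1 is out of range; those inputs are outside
-- Pre_tilt_right, the port's guard 'b+1 < row.length' just makes it total.
def pySlideA (row : List String) (c : String) (b : Nat) : List String × Nat :=
  if h : row.getD b "" = c ∧ row.getD (b+1) "" = "." ∧ b + 1 < row.length then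
    pySlideA ((row.set (b+1) c).set b ".") c (b+1)
  else (row, b)
termination_by row.length - b
decreasing_by simp only [List.length_set]; omega

-- one 'if maps[m][n] == c' body of A: slide, then drop into the hole if the next cell is 'O'
def handleA (row : List String) (out : List String) (j : Nat) (c : String) :
    List String × List String :=
  let rb := pySlideA row c j
  if rb.1.getD (rb.2 + 1) "" = "O" then ((rb.1.set rb.2 "."), out ++ [c])
  else (rb.1, out)

-- body of A's inner for-loop at column index j (two successive ifs, re-reading the cell)
def stepA (row : List String) (out : List String) (j : Nat) : List String × List String :=
  let p := if row.getD j "" = "B" then handleA row out j "B" else (row, out)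
  if p.1.getD j "" = "R" then handleA p.1 p.2 j "R" else p

-- for n in range(len(row)-1, -1, -1): indices k-1, k-2, …, 0
def rowA : List String → List String → Nat → List String × List String
  | row, out, 0 => (row, out)
  | row, out, k+1 =>
    let p := stepA row out k
    rowA p.1 p.2 k

-- for m in range(len(maps)): each row only ever touches itself (a = m throughout)
def tiltA : List (List String) → List String → List (List String) × List String
  | [], out => ([], out)
  | r :: rs, out =>
    let p := rowA r out r.length
    let q := tiltA rs p.2
    (p.1 :: q.1, q.2)

def tilt_right (temp_map : List (List String)) : List (List String) × List String :=
  tiltA temp_map []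

-- ===== PORT B =====
-- single right-to-left sweep of one row; k = (current index)+1, slot = landing index of the
-- next ball found (Python int, may reach -1 unused), hole = next ball falls into an 'O'
def rowB : List String → List String → Nat → Int → Bool → List String × List String
  | res, out, 0, _, _ => (res, out)
  | res, out, j+1, slot, hole =>
    let c := res.getD j ""
    if c = "B" ∨ c = "R" then
      let res' := res.set j "."
      if hole then rowB res' (out ++ [c]) j slot hole
      else rowB (res'.set slot.toNat c) out j (slot - 1) hole
    else if c = "O" then rowB res out j slot true
    else if c ≠ "." then rowB res out j ((j : Int) - 1) false
    else rowB res out j slot hole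

def tiltB : List (List String) → List String → List (List String) × List String
  | [], out => ([], out)
  | r :: rs, out =>
    let p := rowB r out r.length ((r.length : Int) - 1) false
    let q := tiltB rs p.2
    (p.1 :: q.1, q.2)

def tilt_right_alt (temp_map : List (List String)) : List (List String) × List String :=
  tiltB temp_map []

-- ===== PRECONDITION & SPEC =====
-- Pre_ excludes exactly the inputs where A raises IndexError: a ball with only '.' strictly
-- to its right slides past the end of its row (maps[a][b+1] with b+1 == len).
def Pre_tilt_right (temp_map : List (List String)) : Prop :=
  ∀ row ∈ temp_map, ∀ i < row.length,
    (row.getD i "" = "B" ∨ row.getD i "" = "R") →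
      ∃ j < row.length, i < j ∧ row.getD j "" ≠ "."
instance (temp_map : List (List String)) : Decidable (Pre_tilt_right temp_map) := by
  unfold Pre_tilt_right; infer_instance

def pvWitness_tilt_right : List (List String) :=
  [[".", "B", ".", "O", "R", "#"], ["R", "B", "#"]]

-- A raises IndexError whenever some row contains a ball ('B'/'R') with only '.' cells strictly
-- to its right; B returns the map with that ball slid to the last column.
def Raises_tilt_right (temp_map : List (List String)) : Prop :=
  ∃ row ∈ temp_map, ∃ i < row.length,
    (row.getD i "" = "B" ∨ row.getD i "" = "R") ∧
    ∀ j < row.length, i < j → row.getD j "" = "."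
instance (temp_map : List (List String)) : Decidable (Raises_tilt_right temp_map) := by
  unfold Raises_tilt_right; infer_instance
def pvRaiseWitness_tilt_right : List (List String) := [["B", "."]]
def pvRaiseWitnessOut_tilt_right : List (List String) × List String := ([[".", "B"]], [])

def Spec_tilt_right (temp_map : List (List String)) (out : List (List String) × List String) : Prop := out = tilt_right_alt temp_map
instance (temp_map : List (List String)) (out : List (List String) × List String) : Decidable (Spec_tilt_right temp_map out) := by unfold Spec_tilt_right; infer_instance

-- ===== CLAIM (what is proved, stated in full; the proofs are below) =====
def Claim_equal_tilt_right : Prop := ∀ (temp_map : List (List String)), Dom_tilt_right temp_map → Pre_tilt_right temp_map → Spec_tilt_right temp_map (tilt_right temp_map)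

def Claim_raises_tilt_right : Prop :=
  (∀ (temp_map : List (List String)), Dom_tilt_right temp_map →
      Raises_tilt_right temp_map → ¬ Pre_tilt_right temp_map) ∧
  (Dom_tilt_right pvRaiseWitness_tilt_right ∧ Raises_tilt_right pvRaiseWitness_tilt_right ∧
    tilt_right_alt pvRaiseWitness_tilt_right = pvRaiseWitnessOut_tilt_right)

-- ===== LEMMAS AND PROOFS =====

lemma getD_set_ne (l : List String) (a : String) {i j : Nat} (h : i ≠ j) :
    (l.set i a).getD j "" = l.getD j "" := by
  simp [List.getD, List.getElem?_set_ne h]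

lemma getD_set_self (l : List String) (a : String) {i : Nat} (h : i < l.length) :
    (l.set i a).getD i "" = a := by
  simp [List.getD, h]

lemma set_getD_self (l : List String) {a : String} {i : Nat} (h : l.getD i "" = a) :
    l.set i a = l := by
  by_cases hi : i < l.length
  · subst h
    simp [List.getD, List.getElem?_eq_getElem hi, List.set_getElem_self]
  · exact List.set_eq_of_length_le (by omega)

-- the sweep invariant: indices ≥ k remain to process; (slot, hole) describe the processed suffix
def SweepInv (res : List String) (k : Nat) (slot : Int) : Bool → Prop
  | true => k ≤ res.length ∧
      ∃ h : Nat, k ≤ h ∧ h < res.length ∧ res.getD h "" = "O" ∧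
        ∀ i : Nat, k ≤ i → i < h → res.getD i "" = "."
  | false => k ≤ res.length ∧
      (k : Int) - 1 ≤ slot ∧ slot < res.length ∧
      (∀ i : Nat, k ≤ i → (i : Int) ≤ slot → res.getD i "" = ".") ∧
      (slot + 1 = res.length ∨
        (res.getD (slot + 1).toNat "" ≠ "." ∧ res.getD (slot + 1).toNat "" ≠ "O"))

lemma pySlideA_eq (c : String) :
    ∀ (n : Nat) (res : List String) (j s : Nat), s - j ≤ n →
    res.getD j "" = c → j ≤ s → s < res.length →
    (∀ i, j < i → i ≤ s → res.getD i "" = ".") →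
    (s + 1 = res.length ∨ res.getD (s+1) "" ≠ ".") →
    pySlideA res c j = ((res.set j ".").set s c, s) := by
  intro n
  induction n with
  | zero =>
    intro res j s hle hj hjs hs hdots hstop
    have hjs' : j = s := by omega
    subst hjs'
    rw [pySlideA, dif_neg, List.set_set, set_getD_self res hj]
    rintro ⟨h1, h2, h3⟩
    rcases hstop with h | h
    · omega
    · exact h h2
  | succ n ih =>
    intro res j s hle hj hjs hs hdots hstop
    by_cases hjs' : j = s
    · subst hjs'
      rw [pySlideA, dif_neg, List.set_set, set_getD_self res hj]
      rintro ⟨h1, h2, h3⟩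
      rcases hstop with h | h
      · omega
      · exact h h2
    · have hlt : j < s := lt_of_le_of_ne hjs hjs'
      have hdot1 : res.getD (j+1) "" = "." := hdots (j+1) (by omega) (by omega)
      rw [pySlideA, dif_pos ⟨hj, hdot1, by omega⟩]
      have hne : j ≠ j + 1 := by omega
      have h2j : ((res.set (j+1) c).set j ".").getD (j+1) "" = c := by
        rw [getD_set_ne _ _ hne, getD_set_self _ _ (by omega)]
      have hdots2 : ∀ i, j + 1 < i → i ≤ s → ((res.set (j+1) c).set j ".").getD i "" = "." := by
        intro i h1 h2
        rw [getD_set_ne _ _ (by omega : j ≠ i), getD_set_ne _ _ (by omega : j + 1 ≠ i)]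
        exact hdots i (by omega) h2
      have hstop2 : s + 1 = ((res.set (j+1) c).set j ".").length ∨
          ((res.set (j+1) c).set j ".").getD (s+1) "" ≠ "." := by
        rcases hstop with h | h
        · left; simpa using h
        · right
          rw [getD_set_ne _ _ (by omega : j ≠ s + 1), getD_set_ne _ _ (by omega : j + 1 ≠ s + 1)]
          exact h
      rw [ih ((res.set (j+1) c).set j ".") (j+1) s (by omega) h2j (by omega) (by simpa using hs)
        hdots2 hstop2]
      have hrow : (((res.set (j+1) c).set j ".").set (j+1) ".") = res.set j "." := by
        rw [List.set_comm _ _ (by omega : j ≠ j + 1), List.set_set, set_getD_self res hdot1]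
      rw [hrow]

lemma handleA_noHole (res out : List String) (c : String) (j : Nat) (s : Nat)
    (hc : c = "B" ∨ c = "R")
    (hj : res.getD j "" = c) (hjs : j ≤ s) (hs : s < res.length)
    (hdots : ∀ i, j < i → i ≤ s → res.getD i "" = ".")
    (hstop : s + 1 = res.length ∨
      (res.getD (s+1) "" ≠ "." ∧ res.getD (s+1) "" ≠ "O")) :
    handleA res out j c = ((res.set j ".").set s c, out) := by
  have hslide := pySlideA_eq c (s - j) res j s (by omega) hj hjs hs hdots
    (by rcases hstop with h | h; exact Or.inl h; exact Or.inr h.1)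
  unfold handleA
  rw [hslide]
  rw [if_neg]
  have hne1 : j ≠ s + 1 := by omega
  have hne2 : s ≠ s + 1 := by omega
  rw [getD_set_ne _ _ hne2, getD_set_ne _ _ hne1]
  rcases hstop with h | h
  · rw [List.getD_eq_default _ _ (by omega)]
    decide
  · exact h.2

lemma handleA_hole (res out : List String) (c : String) (j : Nat) (h : Nat)
    (hc : c = "B" ∨ c = "R")
    (hj : res.getD j "" = c) (hjh : j < h) (hh : h < res.length)
    (hO : res.getD h "" = "O")
    (hdots : ∀ i, j < i → i < h → res.getD i "" = ".") :
    handleA res out j c = (res.set j ".", out ++ [c]) := by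
  have hslide := pySlideA_eq c (h - 1 - j) res j (h - 1) (by omega) hj (by omega) (by omega)
    (fun i h1 h2 => hdots i h1 (by omega))
    (by right; rw [(by omega : h - 1 + 1 = h), hO]; decide)
  unfold handleA
  rw [hslide]
  rw [if_pos, List.set_set]
  · congr 1
    by_cases hjh1 : h - 1 = j
    · rw [hjh1, List.set_set]
    · exact set_getD_self _ (by
        rw [getD_set_ne _ _ (by omega : j ≠ h - 1)]
        exact hdots (h - 1) (by omega) (by omega))
  · rw [(by omega : h - 1 + 1 = h), getD_set_ne _ _ (by omega : h - 1 ≠ h),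
      getD_set_ne _ _ (by omega : j ≠ h), hO]

lemma stepA_hole (res out : List String) (c : String) (k h : Nat)
    (hc : c = "B" ∨ c = "R") (hck : res.getD k "" = c)
    (hkh : k < h) (hh : h < res.length) (hO : res.getD h "" = "O")
    (hdots : ∀ i, k < i → i < h → res.getD i "" = ".") :
    stepA res out k = (res.set k ".", out ++ [c]) := by
  have hmain := handleA_hole res out c k h hc hck hkh hh hO hdots
  have hdotk : (res.set k ".").getD k "" = "." := getD_set_self _ _ (by omega)
  rcases hc with h1 | h1 <;> subst h1 <;> unfold stepA
  · rw [if_pos hck, hmain,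
      if_neg (show ¬(res.set k ".", out ++ ["B"]).1.getD k "" = "R" by
        show ¬(res.set k ".").getD k "" = "R"; rw [hdotk]; decide)]
  · rw [if_neg (show ¬res.getD k "" = "B" by rw [hck]; decide),
      if_pos (show (res, out).1.getD k "" = "R" from hck)]
    exact hmain

lemma stepA_noHole (res out : List String) (c : String) (k s : Nat)
    (hc : c = "B" ∨ c = "R") (hck : res.getD k "" = c)
    (hks : k ≤ s) (hs : s < res.length)
    (hdots : ∀ i, k < i → i ≤ s → res.getD i "" = ".")
    (hstop : s + 1 = res.length ∨
      (res.getD (s+1) "" ≠ "." ∧ res.getD (s+1) "" ≠ "O")) :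
    stepA res out k = ((res.set k ".").set s c, out) := by
  have hmain := handleA_noHole res out c k s hc hck hks hs hdots hstop
  have hget : ∀ c', c' ≠ "R" → ((res.set k ".").set s c').getD k "" ≠ "R" := by
    intro c' hc'
    by_cases hsk : s = k
    · subst hsk; rw [List.set_set, getD_set_self _ _ (by omega)]; exact hc'
    · rw [getD_set_ne _ _ (Ne.intro hsk), getD_set_self _ _ (by omega)]
      decide
  rcases hc with h1 | h1 <;> subst h1 <;> unfold stepA
  · rw [if_pos hck, hmain,
      if_neg (show ¬((res.set k ".").set s "B", out).1.getD k "" = "R" from hget "B" (by decide))]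
  · rw [if_neg (show ¬res.getD k "" = "B" by rw [hck]; decide),
      if_pos (show (res, out).1.getD k "" = "R" from hck)]
    exact hmain

lemma stepA_skip (res out : List String) (k : Nat)
    (hB : res.getD k "" ≠ "B") (hR : res.getD k "" ≠ "R") :
    stepA res out k = (res, out) := by
  unfold stepA
  rw [if_neg hB, if_neg (show ¬(res, out).1.getD k "" = "R" from hR)]

lemma main_lemma : ∀ (k : Nat) (res out : List String) (slot : Int) (hole : Bool),
    SweepInv res k slot hole → rowA res out k = rowB res out k slot hole := by
  intro k
  induction k with
  | zero => intro res out slot hole _; rfl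
  | succ k ih =>
    intro res out slot hole hinv
    by_cases hball : res.getD k "" = "B" ∨ res.getD k "" = "R"
    · cases hole with
      | true =>
        obtain ⟨hklen, h, hkh, hh, hO, hdots⟩ := hinv
        have hstep := stepA_hole res out (res.getD k "") k h hball rfl (by omega) hh hO
          (fun i h1 h2 => hdots i (by omega) h2)
        rw [rowA, hstep]
        simp only [rowB, if_pos hball]
        apply ih
        refine ⟨by simp; omega, h, by omega, by simpa using hh, ?_, ?_⟩
        · rw [getD_set_ne _ _ (by omega : k ≠ h)]; exact hO
        · intro i h1 h2
          by_cases hik : i = k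
          · subst hik; exact getD_set_self _ _ (by omega)
          · rw [getD_set_ne _ _ (Ne.symm hik)]; exact hdots i (by omega) h2
      | false =>
        obtain ⟨hklen, hk1, hsl, hcells, hstop⟩ := hinv
        have hs0 : (0 : Int) ≤ slot := by omega
        set s : Nat := slot.toNat with hsdef
        have hcast : (s : Int) = slot := Int.toNat_of_nonneg hs0
        have hks : k ≤ s := by omega
        have hslen : s < res.length := by omega
        have hstop' : s + 1 = res.length ∨
            (res.getD (s+1) "" ≠ "." ∧ res.getD (s+1) "" ≠ "O") := by
          have htn : (slot + 1).toNat = s + 1 := by omega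
          rcases hstop with hx | hx
          · left; omega
          · right; rw [htn] at hx; exact hx
        have hstep := stepA_noHole res out (res.getD k "") k s hball rfl hks hslen
          (fun i h1 h2 => hcells i (by omega) (by omega)) hstop'
        rw [rowA, hstep]
        simp only [rowB, if_pos hball, if_neg (by decide : ¬(false = true))]
        apply ih
        have hlen2 : ((res.set k ".").set s (res.getD k "")).length = res.length := by simp
        refine ⟨by omega, by omega, by omega, ?_, Or.inr ?_⟩
        · intro i h1 h2
          have his : i < s := by omega
          rw [getD_set_ne _ _ (by omega : s ≠ i)]
          by_cases hik : i = k
          · subst hik; exact getD_set_self _ _ (by omega)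
          · rw [getD_set_ne _ _ (Ne.symm hik)]
            exact hcells i (by omega) (by omega)
        · have htn : (slot - 1 + 1).toNat = s := by omega
          rw [htn, getD_set_self _ _ (by simpa using hslen)]
          rcases hball with hx | hx <;> rw [hx] <;> exact ⟨by decide, by decide⟩
    · rw [not_or] at hball
      have hstep := stepA_skip res out k hball.1 hball.2
      rw [rowA, hstep]
      by_cases hO : res.getD k "" = "O"
      · simp only [rowB, if_neg (not_or.mpr hball), if_pos hO]
        apply ih
        cases hole with
        | true =>
          obtain ⟨hklen, _⟩ := hinv
          exact ⟨by omega, k, le_refl k, by omega, hO, fun i h1 h2 => by omega⟩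
        | false =>
          obtain ⟨hklen, _⟩ := hinv
          exact ⟨by omega, k, le_refl k, by omega, hO, fun i h1 h2 => by omega⟩
      · by_cases hdot : res.getD k "" = "."
        · simp only [rowB, if_neg (not_or.mpr hball), if_neg hO, if_neg (not_not.mpr hdot)]
          apply ih
          cases hole with
          | true =>
            obtain ⟨hklen, h, hkh, hh, hOh, hdots⟩ := hinv
            refine ⟨by omega, h, by omega, hh, hOh, ?_⟩
            intro i h1 h2
            by_cases hik : i = k
            · subst hik; exact hdot
            · exact hdots i (by omega) h2
          | false =>
            obtain ⟨hklen, hk1, hsl, hcells, hstop⟩ := hinv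
            refine ⟨by omega, by omega, hsl, ?_, hstop⟩
            intro i h1 h2
            by_cases hik : i = k
            · subst hik; exact hdot
            · exact hcells i (by omega) h2
        · simp only [rowB, if_neg (not_or.mpr hball), if_neg hO, if_pos hdot]
          apply ih
          have hklen : k + 1 ≤ res.length := by cases hole <;> exact hinv.1
          refine ⟨by omega, by omega, by omega, ?_, Or.inr ?_⟩
          · intro i h1 h2; omega
          · have htn : ((k : Int) - 1 + 1).toNat = k := by omega
            rw [htn]
            exact ⟨hdot, hO⟩

lemma row_eq (row out : List String) :
    rowA row out row.length = rowB row out row.length ((row.length : Int) - 1) false := by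
  apply main_lemma
  refine ⟨le_refl _, by omega, by omega, ?_, Or.inl (by omega)⟩
  intro i h1 h2
  omega

lemma tilt_eq : ∀ (rows : List (List String)) (out : List String),
    tiltA rows out = tiltB rows out := by
  intro rows
  induction rows with
  | nil => intro out; rfl
  | cons r rs ih =>
    intro out
    simp only [tiltA, tiltB, row_eq, ih]

-- ===== VERDICT (by name: the statement is the Claim_ definition above) =====
theorem tilt_right_spec : Claim_equal_tilt_right := by
  intro tm _ _
  unfold Spec_tilt_right tilt_right tilt_right_alt
  exact tilt_eq tm []

def tilt_right_raises : Claim_raises_tilt_right := by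
  unfold Claim_raises_tilt_right
  constructor
  · rintro tm _ ⟨row, hrow, i, hi, hball, hall⟩ hpre
    obtain ⟨j, hj, hij, hne⟩ := hpre row hrow i hi hball
    exact hne (hall j hj hij)
  · decide
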